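-- pv_equiv track=rewrite | github.com/mingzhu0527/code_processing | utils/get_map_data_utils.py | remove_python_tabs3
-- ===== SOURCE A (Python) =====
-- def count_tabs(string):
--     t_count = 0
--     for c in string:
--         if(c !='\t'):
--             break
--         t_count+=1
--     return t_count
--
-- def remove_python_tabs3(string):
--     x = string.strip('\n')
--     x = x.split('\n')
--     min_indent = count_tabs(x[0])
--     indent_l = [count_tabs(y) for y in x]
--     x = [snippet[min(num, min_indent):] for snippet, num in zip(x, indent_l)]
--     x = '\n'.join(x)
--     return x
-- ===== SOURCE B (Python) =====
-- def remove_python_tabs3(string):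
--     x = string.strip('\n')
--     # min_indent = number of leading tabs of the first line (a '\n' stops the scan too)
--     min_indent = 0
--     while min_indent < len(x) and x[min_indent] == '\t':
--         min_indent += 1
--     # single pass: at the start of each line skip up to min_indent tabs
--     out = []
--     skip = min_indent
--     for c in x:
--         if c == '\n':
--             out.append(c)
--             skip = min_indent
--         elif skip and c == '\t':
--             skip -= 1
--         else:
--             skip = 0
--             out.append(c)
--     return ''.join(out)
-- ===== Notes on version B (the rewrite author's own statement) =====
-- stated objective: alternative
-- what changed: Replaces A's split-into-lines / per-line tab-count list / min-and-slice / join pipeline with a single character pass over the stripped string that skips up to min_indent leading tabs after each newline, building the output directly (no line lists, no count list).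
import Mathlib
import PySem

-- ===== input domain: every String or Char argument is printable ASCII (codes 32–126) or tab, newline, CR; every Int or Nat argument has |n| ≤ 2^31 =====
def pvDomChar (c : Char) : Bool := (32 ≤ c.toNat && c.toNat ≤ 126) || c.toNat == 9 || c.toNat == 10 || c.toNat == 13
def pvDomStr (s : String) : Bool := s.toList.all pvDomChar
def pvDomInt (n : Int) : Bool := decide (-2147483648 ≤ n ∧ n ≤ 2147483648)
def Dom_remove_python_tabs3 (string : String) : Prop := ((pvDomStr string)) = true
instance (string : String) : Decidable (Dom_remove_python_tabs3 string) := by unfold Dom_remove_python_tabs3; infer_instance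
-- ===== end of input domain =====

-- B replaces A's split/count-list/slice/join pipeline by a single character pass that skips
-- up to min_indent tabs after each newline (objective: alternative; same cost, no per-line lists).

-- ===== PORT A =====
-- helper count_tabs: the for-loop with break, state t_count
def countTabsA : List Char → Int → Int
  | [], acc => acc
  | c :: t, acc => if c ≠ '\t' then acc else countTabsA t (acc + 1)

def remove_python_tabs3 (string : String) : String :=
  let x := PySem.Chars.stripChars string.toList ['\n']
  let lines := PySem.Chars.splitOn x ['\n']
  -- x[0]: str.split always returns a nonempty list, so index 0 is its head
  let min_indent := countTabsA lines.headI 0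
  let indent_l := lines.map (fun y => countTabsA y 0)
  let x2 := (lines.zip indent_l).map (fun p => PySem.Chars.slice p.1 (some (min p.2 min_indent)) none)
  String.ofList (PySem.Chars.join ['\n'] x2)

-- ===== PORT B =====
-- the while-loop counting leading tabs of x
def bcount : List Char → Nat
  | [] => 0
  | c :: t => if c = '\t' then bcount t + 1 else 0

-- the for-loop over x with state (out, skip); out built structurally
def bloop (mi : Nat) : List Char → Nat → List Char
  | [], _ => []
  | c :: t, skip =>
    if c = '\n' then c :: bloop mi t mi
    else if skip ≠ 0 ∧ c = '\t' then bloop mi t (skip - 1)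
    else c :: bloop mi t 0

def remove_python_tabs3_alt (string : String) : String :=
  let x := PySem.Chars.stripChars string.toList ['\n']
  let mi := bcount x
  String.ofList (bloop mi x mi)

-- ===== PRECONDITION & SPEC =====
def Spec_remove_python_tabs3 (string : String) (out : String) : Prop := out = remove_python_tabs3_alt string
instance (string : String) (out : String) : Decidable (Spec_remove_python_tabs3 string out) := by unfold Spec_remove_python_tabs3; infer_instance

-- ===== CLAIM (what is proved, stated in full; the proofs are below) =====
def Claim_equal_remove_python_tabs3 : Prop := ∀ (string : String), Dom_remove_python_tabs3 string → Spec_remove_python_tabs3 string (remove_python_tabs3 string)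

-- ===== LEMMAS AND PROOFS =====

-- reference split on '\n'
def mysplit : List Char → List (List Char)
  | [] => [[]]
  | c :: t =>
    if c = '\n' then [] :: mysplit t
    else match mysplit t with
      | [] => [[c]]
      | h :: r => (c :: h) :: r

-- remove up to k leading tabs
def dropTabs : Nat → List Char → List Char
  | 0, l => l
  | _ + 1, [] => []
  | k + 1, c :: t => if c = '\t' then dropTabs k t else c :: t

def joinTail (xs : List (List Char)) : List Char := xs.flatMap (fun h => '\n' :: h)

theorem mysplit_ne_nil (l : List Char) : mysplit l ≠ [] := by
  induction l with
  | nil => simp [mysplit]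
  | cons c t ih =>
    simp only [mysplit]
    split
    · simp
    · cases h : mysplit t <;> simp

theorem dropTabs_nil (k : Nat) : dropTabs k [] = [] := by cases k <;> rfl

theorem go_eq (l : List Char) : ∀ (fuel : Nat) (cur : List Char) (acc : List (List Char)),
    l.length < fuel →
    PySem.Chars.splitOn.go ['\n'] fuel l cur acc =
      acc.reverse ++ (match mysplit l with
        | [] => []
        | h :: r => (cur.reverse ++ h) :: r) := by
  induction l with
  | nil =>
    intro fuel cur acc hf
    cases fuel with
    | zero => omega
    | succ f => simp [PySem.Chars.splitOn.go, mysplit]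
  | cons c t ih =>
    intro fuel cur acc hf
    cases fuel with
    | zero => simp at hf
    | succ f =>
      by_cases hc : c = '\n'
      · subst hc
        rw [show PySem.Chars.splitOn.go ['\n'] (f+1) ('\n' :: t) cur acc
            = PySem.Chars.splitOn.go ['\n'] f t [] (cur.reverse :: acc) by
          simp [PySem.Chars.splitOn.go, List.isPrefixOf]]
        rw [ih f [] (cur.reverse :: acc) (by simpa using Nat.lt_of_succ_lt_succ hf)]
        cases h : mysplit t with
        | nil => exact absurd h (mysplit_ne_nil t)
        | cons h' r => simp [mysplit, h]
      · rw [show PySem.Chars.splitOn.go ['\n'] (f+1) (c :: t) cur acc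
            = PySem.Chars.splitOn.go ['\n'] f t (c :: cur) acc by
          have hp : List.isPrefixOf ['\n'] (c :: t) = false := by
            simp [List.isPrefixOf]; exact fun h => absurd h.symm hc
          simp [PySem.Chars.splitOn.go, hp]]
        rw [ih f (c :: cur) acc (by simpa using Nat.lt_of_succ_lt_succ hf)]
        cases h : mysplit t with
        | nil => exact absurd h (mysplit_ne_nil t)
        | cons h' r => simp [mysplit, hc, h]

theorem splitOn_eq (l : List Char) : PySem.Chars.splitOn l ['\n'] = mysplit l := by
  rw [PySem.Chars.splitOn, go_eq l (l.length + 1) [] [] (Nat.lt_succ_self _)]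
  cases h : mysplit l with
  | nil => exact absurd h (mysplit_ne_nil l)
  | cons h' r => simp

theorem countTabsA_eq (l : List Char) : ∀ acc : Int, countTabsA l acc = acc + (bcount l : Int) := by
  induction l with
  | nil => intro acc; simp [countTabsA, bcount]
  | cons c t ih =>
    intro acc
    by_cases hc : c = '\t'
    · simp [countTabsA, bcount, hc, ih (acc + 1)]; ring
    · simp [countTabsA, bcount, hc]

theorem drop_min_eq (y : List Char) : ∀ m : Nat, y.drop (min (bcount y) m) = dropTabs m y := by
  induction y with
  | nil => intro m; simp [dropTabs_nil]
  | cons c t ih =>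
    intro m
    by_cases hc : c = '\t'
    · subst hc
      cases m with
      | zero => simp [dropTabs]
      | succ k =>
        have hb : bcount ('\t' :: t) = bcount t + 1 := by simp [bcount]
        rw [hb, show min (bcount t + 1) (k + 1) = min (bcount t) k + 1 by omega]
        simpa [dropTabs] using ih k
    · have : bcount (c :: t) = 0 := by simp [bcount, hc]
      rw [this]
      cases m with
      | zero => simp [dropTabs]
      | succ k => simp [dropTabs, hc]

theorem bcount_head (l : List Char) : bcount (mysplit l).headI = bcount l := by
  induction l with
  | nil => simp [mysplit]
  | cons c t ih =>
    by_cases hc : c = '\n'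
    · subst hc
      simp [mysplit, bcount]
    · simp only [mysplit, if_neg hc]
      cases h : mysplit t with
      | nil => exact absurd h (mysplit_ne_nil t)
      | cons h' r =>
        rw [h] at ih
        by_cases ht : c = '\t'
        · simp [bcount, ht, ← ih]
        · simp [bcount, ht]

theorem join_cons (a : List Char) (xs : List (List Char)) :
    PySem.Chars.join ['\n'] (a :: xs) = a ++ joinTail xs := by
  induction xs generalizing a with
  | nil => simp [PySem.Chars.join, List.intercalate, joinTail]
  | cons b xs ih =>
    have : PySem.Chars.join ['\n'] (a :: b :: xs) = a ++ ['\n'] ++ PySem.Chars.join ['\n'] (b :: xs) := by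
      simp [PySem.Chars.join, List.intercalate, List.intersperse]
    rw [this, ih b, joinTail]
    simp [joinTail]

theorem bloop_eq (mi : Nat) (l : List Char) : ∀ skip : Nat,
    bloop mi l skip =
      dropTabs skip (mysplit l).headI ++ joinTail ((mysplit l).tail.map (dropTabs mi)) := by
  induction l with
  | nil => intro skip; simp [bloop, mysplit, dropTabs_nil, joinTail]
  | cons c t ih =>
    intro skip
    by_cases hc : c = '\n'
    · subst hc
      simp only [bloop, mysplit]
      rw [ih mi]
      cases h : mysplit t with
      | nil => exact absurd h (mysplit_ne_nil t)
      | cons h' r =>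
        simp [joinTail, dropTabs_nil]
    · simp only [mysplit, if_neg hc]
      cases h : mysplit t with
      | nil => exact absurd h (mysplit_ne_nil t)
      | cons h' r =>
        have iht := ih
        rw [h] at iht
        by_cases ht : c = '\t'
        · subst ht
          cases skip with
          | zero =>
            simp only [bloop, if_neg (by decide : ¬ ('\t' = '\n'))]
            rw [if_neg (by simp)]
            rw [iht 0]
            simp [dropTabs]
          | succ k =>
            simp only [bloop, if_neg (by decide : ¬ ('\t' = '\n'))]
            rw [if_pos (by simp)]
            simp only [Nat.add_sub_cancel]
            rw [iht k]
            simp [dropTabs]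
        · simp only [bloop, if_neg hc]
          rw [if_neg (by simp [ht])]
          rw [iht 0]
          cases skip with
          | zero => simp [dropTabs]
          | succ k => simp [dropTabs, ht]

theorem zip_map_self {α β : Type} (l : List α) (f : α → β) :
    l.zip (l.map f) = l.map (fun a => (a, f a)) := by
  induction l with
  | nil => rfl
  | cons a t ih => simp [ih]

-- ===== VERDICT (by name: the statement is the Claim_ definition above) =====
theorem remove_python_tabs3_spec : Claim_equal_remove_python_tabs3 := by
  intro string _
  unfold Spec_remove_python_tabs3 remove_python_tabs3 remove_python_tabs3_alt
  set x := PySem.Chars.stripChars string.toList ['\n'] with hx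
  simp only [splitOn_eq]
  congr 1
  rw [zip_map_self, List.map_map]
  have hmin : countTabsA (mysplit x).headI 0 = (bcount x : Int) := by
    rw [countTabsA_eq, bcount_head]; simp
  have hmap : ∀ y : List Char,
      PySem.Chars.slice y (some (min (countTabsA y 0) (countTabsA (mysplit x).headI 0))) none
        = dropTabs (bcount x) y := by
    intro y
    rw [hmin, countTabsA_eq]
    simp only [zero_add]
    rw [PySem.Chars.slice_eq_listSlice,
      PySem.List.slice_from _ (le_min (Int.natCast_nonneg _) (Int.natCast_nonneg _))]
    rw [show (min ((bcount y : Int)) ((bcount x : Int))).toNat = min (bcount y) (bcount x) from by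
      omega]
    exact drop_min_eq y (bcount x)
  have : (mysplit x).map ((fun p : List Char × Int =>
        PySem.Chars.slice p.1 (some (min p.2 (countTabsA (mysplit x).headI 0))) none) ∘
        (fun y => (y, countTabsA y 0)))
      = (mysplit x).map (dropTabs (bcount x)) :=
    List.map_congr_left (fun y _ => hmap y)
  rw [this]
  cases h : mysplit x with
  | nil => exact absurd h (mysplit_ne_nil x)
  | cons h' r =>
    rw [List.map_cons, join_cons, bloop_eq]
    simp [h]
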